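/-
  SEGMENT C6 OF `start_decoder` (`c->sorted_entries = sorted_count`, FIX 4, the allocations of `codewords` (dense) / `codeword_lengths`,
  `codewords` = P2, `values` = P3 (sparse), the `size` statistic; stb_vorbis_fixed.c:3824–3845, 0x114668 … 0x1146ce + 0x11487b …
  0x1149b5, 92 instructions), SPLIT IN FIVE at the returns of its four allocator calls: `Vorbis.L.start_decoder.cut128` (0x1148b0,
  `setup_malloc(f, 4·E)`, dense), `cut130` (0x1148f3, `setup_malloc(f, SE)`, sparse), `cut131` (0x114930, `setup_temp_malloc(f, 4·SE)`
  = P2), `cut132` (0x114969, `setup_temp_malloc(f, 4·SE)` = P3). The farm worker of attempt 1 proposed the same four cuts.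

      StartDecoder.InC6Mid          what all four cut points share: `Frame` at the cut, CUR(i), the ages `Ai ≤ Aw ≤ A`, K1, K2,
                                    `rbx = lengths`, L(E), the book fresh at {LT, LV, MU, SC, SV}
      StartDecoder.InC6b / AtC6b    0x1148b0 (dense): `sparse = 0`, `lengths = CL` older than `Aw`, no temp block, CNT′,
                                    rax = NULL or a block of `4·E` bytes allocated since `Aw`
      StartDecoder.InC6c / AtC6c    0x1148f3 (sparse): `sparse = 1`, temps = [P1], CNT, rax = NULL or a block of `SE` bytes since `Aw`
      StartDecoder.InC6d / AtC6d    0x114930 (sparse): `codeword_lengths` stored (a block of `SE` bytes since `Aw`), rax = NULL or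
                                    temps = [(rax, 4·SE), P1]
      StartDecoder.InC6e / AtC6e    0x114969 (sparse): `codewords` stored (= P2), rax = NULL or temps = [(rax, 4·SE), P2, P1]
      StartDecoder.C6.built_dense / built_sparse    `Built` (the body of `AtC7`) from the clauses of the last cut point: the exits'
                                    pure part; they also show that the cut assertions are strong enough
      StartDecoder.SegC6a … SegC6e  the five children
      StartDecoder.SegC6.of_parts   SegC6a → … → SegC6e → SegC6   (the claim `SegC6` of StartDecoderA.lean is unchanged)

  THE AGES. `Aw` := the arena of `AtC6` (`InC6`'s doc: "the arena of THIS point is the snapshot `Aw` of `AtC7`"): the `lengths` block of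
  a dense book is older (`Since Ai Aw`, from `InC6.place.dense_block`), everything this segment allocates is `Since Aw A.1`
  (`ArenaOK.since_pushSetup` at the call, `.mono` along the later growth). `Ai.Extends Aw` is `Cur.ages.exti` at the entry;
  `Aw.Extends A.1` starts as `Arena.Extends.refl` and grows by `extends_pushSetup` / `extends_pushTemp` (`Arena.Extends.trans`).
  Registers (callee-saved only survive a cut): `r14 = c` (`Cur.r14`), `rbx = lengths`; `rbp`, `r12`, `r13`, `r15` are DEAD at all four cuts
  (`mov rbp,rax` / `mov r12,rax` follow at once; `sorted_entries` is re-read from `[r14+840H]`; `r13b = sparse` is not read after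
  0x11468b). Stack slots: `q[R+18H] = f` (`Cur.slot_f`).
  THE TEMP BLOCKS are stated by ABSOLUTE address (`TempsAre`): `setup_temp_malloc`'s post gives `pushTemp` = the new block FIRST in the
  list; `setup_malloc` leaves `temps` as it is (`pushSetup`).
-/
import Vorbis.LabelsAt
import Vorbis.Spec.StartDecoderA
import Vorbis.Spec.StartDecoderCarry
namespace Vorbis.Spec.StartDecoder
open X86 X86.User Asan

/-- **What the four cut points of C6 share** (`pc` = the cut's label): `Frame`, CUR(i) over the ghost arena `A` AFTER the allocator
call that just returned, the ages (`Aw` = the arena of `AtC6`), K1, K2 (`sorted_entries` was stored at 0x114674; FIX 4 was tested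
at 0x114680), `rbx = lengths` (callee-saved, read by C7), L(E) for the `lengths` array (its bytes are in no allocator's footprint),
and the five fields of the book that C6 does not write. -/
structure InC6Mid (u₀ : State) (g : Ghost) (i : Nat) (A2 A3 Ai Aw : Arena) (A : Arena × List Obj) (lengths : Nat) (pc : Word)
    (v : State) : Prop where
  frame : Frame u₀ g pc A v
  cur : Cur g i A2 A3 Ai A v
  /-- `Aw` lies between the head of the iteration and now -/
  extw : Ai.Extends Aw
  extw' : Aw.Extends A.1
  k1 : Codebook.K1 v.mem (g.cb v.mem i)
  k2 : Codebook.K2 v.mem (g.cb v.mem i)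
  rbx : v.reg .rbx = addr lengths
  lenL : LenL v.mem lengths (Codebook.entries v.mem (g.cb v.mem i)).toNat
  /-- `Fresh7` of `InC6` minus `sorted_entries` (stored 0x114674) and `codewords` (stored 0x1148bc / 0x11493c) -/
  fresh : Fresh5 v.mem (g.cb v.mem i)

/-- **`AtC6b i`, 0x1148b0** (`cut128`, the return of `setup_malloc(f, 4·entries)`, the DENSE book; exit of `C6a`, entry of `C6b`):
`InC6Mid` ∧ `sparse = 0` ∧ `lengths = codeword_lengths`, a block of `E` bytes allocated between `Ai` and `Aw` ∧ no temp block ∧ CNT′ ∧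
the allocator's result: NULL, or a block of `4·E` bytes allocated since `Aw` (`lea esi,[rax*4]` with `E < 2^24`: no 32-bit wrap). -/
structure InC6b (u₀ : State) (g : Ghost) (i : Nat) (A2 A3 Ai Aw : Arena) (A : Arena × List Obj) (lengths : Nat) (v : State) :
    Prop where
  mid : InC6Mid u₀ g i A2 A3 Ai Aw A lengths L.start_decoder.cut128 v
  sparse0 : Codebook.sparse v.mem (g.cb v.mem i) = 0
  dense_lengths :
    Since Ai Aw ⟨Codebook.codeword_lengths v.mem (g.cb v.mem i), (Codebook.entries v.mem (g.cb v.mem i)).toNat⟩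
  dense_eq : lengths = Codebook.codeword_lengths v.mem (g.cb v.mem i)
  noTemps : A.1.temps = []
  cnt : CNT' v.mem lengths (g.cb v.mem i)
  /-- the result of `setup_malloc(f, 4·E)` (stored into `c->codewords` at 0x1148bc) -/
  res : v.reg .rax = 0 ∨
    Since Aw A.1 ⟨(v.reg .rax).toNat, 4 * (Codebook.entries v.mem (g.cb v.mem i)).toNat⟩

/-- `AtC6b i`: `InC6b` for some ghost arena, `lengths` array and ghost snapshots. -/
def AtC6b (u₀ : State) (g : Ghost) (i : Nat) (v : State) : Prop :=
  ∃ A lengths A2 A3 Ai Aw, InC6b u₀ g i A2 A3 Ai Aw A lengths v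

/-- **`AtC6c i`, 0x1148f3** (`cut130`, the return of `setup_malloc(f, sorted_entries)`, the SPARSE book; exit of `C6a`, entry of
`C6c`): `InC6Mid` ∧ `sparse = 1` ∧ temps = [P1 = (lengths, E)] (`setup_malloc` leaves the temp blocks) ∧ CNT ∧ the allocator's
result: NULL, or a block of `SE` bytes allocated since `Aw`. -/
structure InC6c (u₀ : State) (g : Ghost) (i : Nat) (A2 A3 Ai Aw : Arena) (A : Arena × List Obj) (lengths : Nat) (v : State) :
    Prop where
  mid : InC6Mid u₀ g i A2 A3 Ai Aw A lengths L.start_decoder.cut130 v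
  sparse1 : Codebook.sparse v.mem (g.cb v.mem i) = 1
  temps : TempsAre A.1 [(lengths, (Codebook.entries v.mem (g.cb v.mem i)).toNat)]
  cnt : CNT v.mem lengths (g.cb v.mem i)
  /-- the result of `setup_malloc(f, SE)` (stored into `c->codeword_lengths` at 0x1148ff) -/
  res : v.reg .rax = 0 ∨
    Since Aw A.1 ⟨(v.reg .rax).toNat, (Codebook.sorted_entries v.mem (g.cb v.mem i)).toNat⟩

/-- `AtC6c i`: `InC6c` for some ghost arena, `lengths` array and ghost snapshots. -/
def AtC6c (u₀ : State) (g : Ghost) (i : Nat) (v : State) : Prop :=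
  ∃ A lengths A2 A3 Ai Aw, InC6c u₀ g i A2 A3 Ai Aw A lengths v

/-- **`AtC6d i`, 0x114930** (`cut131`, the return of the first `setup_temp_malloc(f, 4·sorted_entries)`; exit of `C6c`, entry of
`C6d`): `InC6Mid` ∧ `sparse = 1` ∧ `codeword_lengths` (stored 0x1148ff, non-NULL) is a block of `SE` bytes allocated since `Aw` ∧ CNT
∧ the allocator's result: NULL, or the new temp block on top of P1. -/
structure InC6d (u₀ : State) (g : Ghost) (i : Nat) (A2 A3 Ai Aw : Arena) (A : Arena × List Obj) (lengths : Nat) (v : State) :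
    Prop where
  mid : InC6Mid u₀ g i A2 A3 Ai Aw A lengths L.start_decoder.cut131 v
  sparse1 : Codebook.sparse v.mem (g.cb v.mem i) = 1
  sparse_lengths :
    Since Aw A.1 ⟨Codebook.codeword_lengths v.mem (g.cb v.mem i), (Codebook.sorted_entries v.mem (g.cb v.mem i)).toNat⟩
  cnt : CNT v.mem lengths (g.cb v.mem i)
  /-- the result of `setup_temp_malloc(f, 4·SE)` (stored into `c->codewords` at 0x11493c): P2 -/
  res : v.reg .rax = 0 ∨
    TempsAre A.1
      [((v.reg .rax).toNat, 4 * (Codebook.sorted_entries v.mem (g.cb v.mem i)).toNat),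
       (lengths, (Codebook.entries v.mem (g.cb v.mem i)).toNat)]

/-- `AtC6d i`: `InC6d` for some ghost arena, `lengths` array and ghost snapshots. -/
def AtC6d (u₀ : State) (g : Ghost) (i : Nat) (v : State) : Prop :=
  ∃ A lengths A2 A3 Ai Aw, InC6d u₀ g i A2 A3 Ai Aw A lengths v

/-- **`AtC6e i`, 0x114969** (`cut132`, the return of the second `setup_temp_malloc(f, 4·sorted_entries)`; exit of `C6d`, entry of
`C6e`): `InC6d`'s clauses with `codewords` stored (0x11493c, non-NULL: it is P2) ∧ the allocator's result: NULL, or the new temp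
block P3 (`values`, `mov r12,rax`) on top of P2, P1. -/
structure InC6e (u₀ : State) (g : Ghost) (i : Nat) (A2 A3 Ai Aw : Arena) (A : Arena × List Obj) (lengths : Nat) (v : State) :
    Prop where
  mid : InC6Mid u₀ g i A2 A3 Ai Aw A lengths L.start_decoder.cut132 v
  sparse1 : Codebook.sparse v.mem (g.cb v.mem i) = 1
  sparse_lengths :
    Since Aw A.1 ⟨Codebook.codeword_lengths v.mem (g.cb v.mem i), (Codebook.sorted_entries v.mem (g.cb v.mem i)).toNat⟩
  cnt : CNT v.mem lengths (g.cb v.mem i)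
  /-- the result of `setup_temp_malloc(f, 4·SE)`: P3 = `values`, above P2 = `codewords` and P1 = `lengths` -/
  res : v.reg .rax = 0 ∨
    TempsAre A.1
      [((v.reg .rax).toNat, 4 * (Codebook.sorted_entries v.mem (g.cb v.mem i)).toNat),
       (Codebook.codewords v.mem (g.cb v.mem i), 4 * (Codebook.sorted_entries v.mem (g.cb v.mem i)).toNat),
       (lengths, (Codebook.entries v.mem (g.cb v.mem i)).toNat)]

/-- `AtC6e i`: `InC6e` for some ghost arena, `lengths` array and ghost snapshots. -/
def AtC6e (u₀ : State) (g : Ghost) (i : Nat) (v : State) : Prop :=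
  ∃ A lengths A2 A3 Ai Aw, InC6e u₀ g i A2 A3 Ai Aw A lengths v

namespace C6

/-- **`Built` of a DENSE book** (the exit `AtC7` of `C6b`): from the clauses of `InC6b` restated at the exit state `w` (after the store
`c->codewords = rax ≠ 0` and `mov r12d,0`; carried there by `MInv.step` / `BookFields`), `values = 0`. Every sparse clause is vacuous.
WHEN: the last step of `C6b`'s success arm. -/
theorem built_dense {g : Ghost} {i : Nat} {A2 A3 Ai Aw : Arena} {A : Arena × List Obj} {lengths : Nat} {w : State}
    (cur : Cur g i A2 A3 Ai A w) (extw : Ai.Extends Aw) (extw' : Aw.Extends A.1)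
    (k1 : Codebook.K1 w.mem (g.cb w.mem i)) (k2 : Codebook.K2 w.mem (g.cb w.mem i))
    (rbx : w.reg .rbx = addr lengths) (r12 : w.reg .r12 = addr 0)
    (lenL : LenL w.mem lengths (Codebook.entries w.mem (g.cb w.mem i)).toNat)
    (sparse0 : Codebook.sparse w.mem (g.cb w.mem i) = 0)
    (dl : Since Ai Aw ⟨Codebook.codeword_lengths w.mem (g.cb w.mem i), (Codebook.entries w.mem (g.cb w.mem i)).toNat⟩)
    (dcw : Since Aw A.1 ⟨Codebook.codewords w.mem (g.cb w.mem i), 4 * (Codebook.entries w.mem (g.cb w.mem i)).toNat⟩)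
    (deq : lengths = Codebook.codeword_lengths w.mem (g.cb w.mem i)) (noTemps : A.1.temps = [])
    (cnt : CNT' w.mem lengths (g.cb w.mem i)) (fresh : Fresh5 w.mem (g.cb w.mem i)) :
    Built g i A2 A3 Ai Aw A lengths 0 w := by
  have hne : ¬ Codebook.sparse w.mem (g.cb w.mem i) = 1 := by
    rw [sparse0]
    decide
  exact
    { cur := cur
      extw := extw
      extw' := extw'
      k1 := k1
      k2 := k2
      rbx := rbx
      r12 := r12
      lenL := lenL
      dense_values := fun _ => rfl
      dense_lengths := fun _ => dl
      dense_codewords := fun _ => dcw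
      dense_eq := fun _ => deq
      dense_temps := fun _ => noTemps
      dense_cnt := fun _ => cnt
      sparse_lengths := fun h => absurd h hne
      sparse_temps := fun h => absurd h hne
      sparse_cnt := fun h => absurd h hne
      fresh := fresh }

/-- **`Built` of a SPARSE book** (the exit `AtC7` of `C6e`): from the clauses of `InC6e` restated at the exit state `w` (after
`mov r12,rax` with `rax ≠ 0` and the `size` statistic), `values` = the block in `r12`. Every dense clause is vacuous.
WHEN: the last step of `C6e`'s success arm. -/
theorem built_sparse {g : Ghost} {i : Nat} {A2 A3 Ai Aw : Arena} {A : Arena × List Obj} {lengths values : Nat} {w : State}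
    (cur : Cur g i A2 A3 Ai A w) (extw : Ai.Extends Aw) (extw' : Aw.Extends A.1)
    (k1 : Codebook.K1 w.mem (g.cb w.mem i)) (k2 : Codebook.K2 w.mem (g.cb w.mem i))
    (rbx : w.reg .rbx = addr lengths) (r12 : w.reg .r12 = addr values)
    (lenL : LenL w.mem lengths (Codebook.entries w.mem (g.cb w.mem i)).toNat)
    (sparse1 : Codebook.sparse w.mem (g.cb w.mem i) = 1)
    (sl : Since Aw A.1
      ⟨Codebook.codeword_lengths w.mem (g.cb w.mem i), (Codebook.sorted_entries w.mem (g.cb w.mem i)).toNat⟩)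
    (temps : TempsAre A.1
      [(values, 4 * (Codebook.sorted_entries w.mem (g.cb w.mem i)).toNat),
       (Codebook.codewords w.mem (g.cb w.mem i), 4 * (Codebook.sorted_entries w.mem (g.cb w.mem i)).toNat),
       (lengths, (Codebook.entries w.mem (g.cb w.mem i)).toNat)])
    (cnt : CNT w.mem lengths (g.cb w.mem i)) (fresh : Fresh5 w.mem (g.cb w.mem i)) :
    Built g i A2 A3 Ai Aw A lengths values w := by
  have hne : ¬ Codebook.sparse w.mem (g.cb w.mem i) = 0 := by
    rw [sparse1]
    decide
  exact
    { cur := cur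
      extw := extw
      extw' := extw'
      k1 := k1
      k2 := k2
      rbx := rbx
      r12 := r12
      lenL := lenL
      dense_values := fun h => absurd h hne
      dense_lengths := fun h => absurd h hne
      dense_codewords := fun h => absurd h hne
      dense_eq := fun h => absurd h hne
      dense_temps := fun h => absurd h hne
      dense_cnt := fun h => absurd h hne
      sparse_lengths := fun _ => sl
      sparse_temps := fun _ => temps
      sparse_cnt := fun _ => cnt
      fresh := fresh }

end C6

/-! ### The claims of the children -/

/-- **Segment `start_decoder.C6a`** (0x114668 … 0x114699 + the FIX 4 stub 0x11487b … 0x11488d + 0x114892 … 0x1148ab + 0x1148e7 …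
0x1148ee, 26 instructions: the checked store `c->sorted_entries = ebp`, FIX 4 (`sparse ∧ sorted_count = 0` → ERRSTUB(20)), the
dispatch on `r13b = sparse`, the FIRST allocator call: `setup_malloc(f, 4·E)` (dense) or `setup_malloc(f, SE)` (sparse). The
instruction 0x114699 `mov r12d,0` is unreachable: `sparse ∧ ebp = 0` went to the stub). -/
def SegC6a (Lay : Layout) (μ : Microarch) (u₀ : State) : Prop :=
  ∀ (g : Ghost) (i : Nat) (v : State), AtC6 u₀ g i v →
    ReachVia Lay μ WayInv v (fun w => AtERR u₀ g w ∨ AtC6b u₀ g i w ∨ AtC6c u₀ g i w)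

/-- **Segment `start_decoder.C6b`** (0x1148b0 … 0x1148cb + the outofmem stub 0x1148d0 … 0x1148e2, 13 instructions: the checked store
`c->codewords = rax`, NULL → ERRSTUB(3), `values = 0` (`mov r12d,0`), `jmp 0x1146d2`): the dense book, to `AtC7` (the `size`
statistic is skipped). -/
def SegC6b (Lay : Layout) (μ : Microarch) (u₀ : State) : Prop :=
  ∀ (g : Ghost) (i : Nat) (v : State), AtC6b u₀ g i v →
    ReachVia Lay μ WayInv v (fun w => AtC7 u₀ g i w ∨ AtERR u₀ g w)

/-- **Segment `start_decoder.C6c`** (0x1148f3 … 0x11492b + the outofmem stub 0x11498c … 0x11499e, 17 instructions: the checked store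
`c->codeword_lengths = rax`, NULL → ERRSTUB(3), the checked load of `sorted_entries`, `setup_temp_malloc(f, 4·SE)`). -/
def SegC6c (Lay : Layout) (μ : Microarch) (u₀ : State) : Prop :=
  ∀ (g : Ghost) (i : Nat) (v : State), AtC6c u₀ g i v →
    ReachVia Lay μ WayInv v (fun w => AtC6d u₀ g i w ∨ AtERR u₀ g w)

/-- **Segment `start_decoder.C6d`** (0x114930 … 0x114964 + the outofmem stub 0x1149a3 … 0x1149b5, 17 instructions: the checked store
`c->codewords = rax`, NULL → ERRSTUB(3), the checked load of `sorted_entries`, `setup_temp_malloc(f, 4·SE)`). -/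
def SegC6d (Lay : Layout) (μ : Microarch) (u₀ : State) : Prop :=
  ∀ (g : Ghost) (i : Nat) (v : State), AtC6d u₀ g i v →
    ReachVia Lay μ WayInv v (fun w => AtC6e u₀ g i w ∨ AtERR u₀ g w)

/-- **Segment `start_decoder.C6e`** (0x114969 … 0x11496f + the outofmem stub 0x114975 … 0x114987 + 0x11469f … 0x1146ce, 19
instructions: `values = rax`, NULL → ERRSTUB(3); the `size` statistic of lines 3841–3843: `size = entries + 8·sorted_entries`,
the checked load of `f->setup_temp_memory_required` and its conditional store `[f+10H]`): the sparse book, to `AtC7`. -/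
def SegC6e (Lay : Layout) (μ : Microarch) (u₀ : State) : Prop :=
  ∀ (g : Ghost) (i : Nat) (v : State), AtC6e u₀ g i v →
    ReachVia Lay μ WayInv v (fun w => AtC7 u₀ g i w ∨ AtERR u₀ g w)

/-- **Segment C6 from its five parts**: a → (ERR | b | c), b → (C7 | ERR), c → (d | ERR), d → (e | ERR), e → (C7 | ERR). No loop. -/
theorem SegC6.of_parts {Lay : Layout} {μ : Microarch} {u₀ : State} (ha : SegC6a Lay μ u₀) (hb : SegC6b Lay μ u₀)
    (hc : SegC6c Lay μ u₀) (hd : SegC6d Lay μ u₀) (he : SegC6e Lay μ u₀) : SegC6 Lay μ u₀ := by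
  intro g i v hat
  refine (ha g i v hat).trans ?_
  intro v1 h1
  rcases h1 with herr | h6b | h6c
  · exact ReachVia.done (Or.inr herr)
  · exact hb g i v1 h6b
  refine (hc g i v1 h6c).trans ?_
  intro v2 h2
  rcases h2 with h6d | herr
  · refine (hd g i v2 h6d).trans ?_
    intro v3 h3
    rcases h3 with h6e | herr
    · exact he g i v3 h6e
    · exact ReachVia.done (Or.inr herr)
  · exact ReachVia.done (Or.inr herr)

end Vorbis.Spec.StartDecoder
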